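-- pv_equiv track=rewrite | github.com/trosendo/Python | Exercicios/Exercícios/Aula prática 8.py | reverse_lookup
-- ===== SOURCE A (Python) =====
-- def reverse_lookup(s,v):
--     lista=[]
--     d=dict()
--     for c in s:
--         d[c] = d.get(c,0)+1
--     for l in d:
--         if d[l] == v:
--             lista.append(l)
--     return lista
--     raise ValueError
-- ===== SOURCE B (Python) =====
-- def reverse_lookup(s, v):
--     lista = []
--     for i, c in enumerate(s):
--         if s.index(c) == i and s.count(c) == v:
--             lista.append(c)
--     return lista
-- ===== Notes on version B (the rewrite author's own statement) =====
-- stated objective: alternative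
-- what changed: B keeps no frequency dictionary: it scans with enumerate and keeps c when s.index(c)==i marks the first occurrence and s.count(c)==v, yielding the same first-occurrence order by repeated scanning.
import Mathlib
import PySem

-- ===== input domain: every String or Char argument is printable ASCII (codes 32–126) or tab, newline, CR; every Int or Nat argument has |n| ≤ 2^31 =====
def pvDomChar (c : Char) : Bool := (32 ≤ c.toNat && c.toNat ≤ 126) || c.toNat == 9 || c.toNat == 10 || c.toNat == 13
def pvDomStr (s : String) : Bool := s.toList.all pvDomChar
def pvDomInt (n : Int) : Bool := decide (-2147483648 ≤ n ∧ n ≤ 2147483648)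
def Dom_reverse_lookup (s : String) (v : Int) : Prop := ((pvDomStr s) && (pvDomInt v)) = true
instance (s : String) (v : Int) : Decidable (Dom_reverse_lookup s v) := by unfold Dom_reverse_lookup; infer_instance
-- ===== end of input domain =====

-- B replaces A's frequency dictionary by an enumerate scan with a first-occurrence
-- guard (s.index(c) == i) and s.count(c) == v; same value, alternative algorithm.

-- ===== PORT A =====
-- d[c] = d.get(c,0)+1 is insert with getD; d[l] in the second loop cannot raise
-- (l ranges over d's keys), so getD is exact there.
def reverse_lookup (s : String) (v : Int) : List String :=
  let d : PySem.Dict Char Int :=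
    s.toList.foldl (fun d c => d.insert c (d.getD c 0 + 1)) PySem.Dict.empty
  d.keys.foldl (fun lista l => if d.getD l 0 == v then lista ++ [l.toString] else lista) []

-- ===== PORT B =====
-- s.index(c) / s.count(c) with a single character c taken from s: exact as list
-- index? / count on s.toList (s.index never raises since c ∈ s).
def reverse_lookup_alt (s : String) (v : Int) : List String :=
  let cs := s.toList
  (PySem.List.enumerate cs).foldl
    (fun lista p =>
      if ((PySem.List.index? cs p.2).map (fun n => (n : Int)) == some p.1)
          && ((cs.count p.2 : Int) == v)
      then lista ++ [p.2.toString] else lista) []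

-- ===== PRECONDITION & SPEC =====
def Spec_reverse_lookup (s : String) (v : Int) (out : List String) : Prop := out = reverse_lookup_alt s v
instance (s : String) (v : Int) (out : List String) : Decidable (Spec_reverse_lookup s v out) := by unfold Spec_reverse_lookup; infer_instance

-- ===== CLAIM (what is proved, stated in full; the proofs are below) =====
def Claim_equal_reverse_lookup : Prop := ∀ (s : String) (v : Int), Dom_reverse_lookup s v → Spec_reverse_lookup s v (reverse_lookup s v)

-- ===== LEMMAS AND PROOFS =====

-- the first-occurrence filter over enumerate yields the ordered dedup of the list
theorem pv_enum_firstocc (cs : List Char) :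
    ((PySem.List.enumerate cs).filter
        (fun p => (PySem.List.index? cs p.2).map (fun n => (n : Int)) == some p.1)).map (·.2)
      = PySem.List.dedup cs := by
  rw [PySem.List.dedup_eq_ofList]
  induction cs using List.reverseRecOn with
  | nil => rfl
  | append_singleton xs x ih =>
    rw [PySem.List.enumerate_append, List.filter_append, List.map_append,
        PySem.Set.ofList_append_singleton]
    have hxs : (PySem.List.enumerate xs 0).filter
        (fun p => (PySem.List.index? (xs ++ [x]) p.2).map (fun n => (n : Int)) == some p.1)
      = (PySem.List.enumerate xs 0).filter
        (fun p => (PySem.List.index? xs p.2).map (fun n => (n : Int)) == some p.1) := by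
      apply List.filter_congr
      intro p hp
      obtain ⟨k, hk, rfl⟩ := (PySem.List.mem_enumerate_iff xs 0 p).mp hp
      rw [PySem.List.index?_append_of_mem _ (List.getElem_mem hk)]
    rw [hxs, ih]
    by_cases hx : x ∈ xs
    · rw [PySem.Set.add_of_mem ((PySem.Set.mem_ofList xs x).mpr hx)]
      have hidx := PySem.List.index?_append_of_mem (l := xs) [x] hx
      obtain ⟨k, hk⟩ := Option.isSome_iff_exists.mp ((PySem.List.index?_isSome_iff xs x).mpr hx)
      obtain ⟨hklt, -, -⟩ := PySem.List.getElem_of_index?_eq_some hk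
      have hpred : ((PySem.List.index? (xs ++ [x]) x).map (fun n => (n : Int))
          == some ((xs.length : Int))) = false := by
        rw [hidx, hk]
        simp
        omega
      rw [PySem.List.enumerate_cons, PySem.List.enumerate_nil]
      simp only [List.filter_cons, List.filter_nil, zero_add, hpred]
      simp
    · rw [PySem.Set.add_of_not_mem (fun h => hx ((PySem.Set.mem_ofList xs x).mp h))]
      have hpred : ((PySem.List.index? (xs ++ [x]) x).map (fun n => (n : Int))
          == some ((xs.length : Int))) = true := by
        rw [PySem.List.index?_append_singleton_self _ _ hx]
        simp
      rw [PySem.List.enumerate_cons, PySem.List.enumerate_nil]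
      simp only [List.filter_cons, List.filter_nil, zero_add, hpred]
      simp

theorem reverse_lookup_spec : Claim_equal_reverse_lookup := by
  intro s v _
  unfold Spec_reverse_lookup reverse_lookup reverse_lookup_alt
  simp only [PySem.Dict.foldl_insert_getD_add_one_eq_counter,
    PySem.List.foldl_append_if, List.nil_append,
    PySem.Dict.keys_counter, ← PySem.List.dedup_eq_ofList, PySem.Dict.getD_counter]
  rw [← pv_enum_firstocc s.toList, List.filter_map, List.map_map, List.filter_filter]
  simp only [Function.comp_def]
  rw [List.filter_congr (l := PySem.List.enumerate s.toList)
      (q := fun a => ((PySem.List.index? s.toList a.2).map (fun n => (n : Int)) == some a.1)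
        && (((List.count a.2 s.toList : Int)) == v))
      (fun p _ => Bool.and_comm _ _)]
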